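-- pv_equiv track=rewrite | github.com/hallamlab/genome_qc | render_phylogeny_ete.py | heatmap_start_column
-- ===== SOURCE A (Python) =====
-- def heatmap_start_column(strip_configs, heatmap_configs, text_configs, spacing_config):
--     column_index = 0
--     if int(spacing_config.get("before_strips", 0)) > 0:
--         column_index += 1
--     for strip in strip_configs:
--         column_index += 1
--         if int(spacing_config.get("between_strips", 0)) > 0:
--             column_index += 1
--     if strip_configs and (text_configs or heatmap_configs) and int(spacing_config.get("between_strips_and_text", 0)) > 0:
--         column_index += 1
--     return column_index
-- ===== SOURCE B (Python) =====
-- def heatmap_start_column(strip_configs, heatmap_configs, text_configs, spacing_config):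
--     total = 1 if int(spacing_config.get("before_strips", 0)) > 0 else 0
--     if strip_configs:
--         step = 2 if int(spacing_config.get("between_strips", 0)) > 0 else 1
--         total += step * len(strip_configs)
--         if (text_configs or heatmap_configs) and int(spacing_config.get("between_strips_and_text", 0)) > 0:
--             total += 1
--     return total
-- ===== Notes on version B (the rewrite author's own statement) =====
-- stated objective: simpler
-- what changed: Replaces the per-strip counting loop with closed-form arithmetic: a width-per-strip factor (1 or 2) multiplied by len(strip_configs), plus indicator terms for the before/after spacing flags.
import Mathlib
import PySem

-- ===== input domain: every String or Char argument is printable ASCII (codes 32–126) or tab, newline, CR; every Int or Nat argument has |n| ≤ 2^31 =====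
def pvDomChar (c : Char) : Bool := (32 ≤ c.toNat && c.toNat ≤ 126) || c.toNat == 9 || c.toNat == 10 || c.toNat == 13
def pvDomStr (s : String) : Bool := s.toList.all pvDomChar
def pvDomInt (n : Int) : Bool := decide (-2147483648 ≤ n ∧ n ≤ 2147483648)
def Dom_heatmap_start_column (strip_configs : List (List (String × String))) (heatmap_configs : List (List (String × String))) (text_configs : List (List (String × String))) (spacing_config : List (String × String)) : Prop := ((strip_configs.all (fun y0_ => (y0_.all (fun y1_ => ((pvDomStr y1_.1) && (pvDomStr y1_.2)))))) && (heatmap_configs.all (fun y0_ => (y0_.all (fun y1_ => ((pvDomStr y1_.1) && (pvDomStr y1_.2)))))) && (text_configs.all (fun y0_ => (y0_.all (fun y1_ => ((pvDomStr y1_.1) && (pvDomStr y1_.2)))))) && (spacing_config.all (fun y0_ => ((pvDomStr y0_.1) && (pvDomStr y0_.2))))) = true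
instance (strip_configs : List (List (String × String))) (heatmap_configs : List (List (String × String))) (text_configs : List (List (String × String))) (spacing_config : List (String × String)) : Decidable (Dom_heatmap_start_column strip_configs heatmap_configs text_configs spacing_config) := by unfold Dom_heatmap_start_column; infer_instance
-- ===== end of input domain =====

-- B replaces A's per-strip counting loop with closed-form arithmetic (a per-strip width of 1
-- or 2 multiplied by the number of strips, plus indicator terms); objective: simpler.

-- int(spacing_config.get(k, 0)): first-match lookup, then Python int(); 0 when the key is
-- absent, and the parse-failure (ValueError) case is excluded by Pre_ below (getD 0 there).
def spInt (spacing_config : List (String × String)) (k : String) : Int :=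
  match spacing_config.find? (fun p => p.1 == k) with
  | some p => (PySem.Int.ofStr? p.2).getD 0
  | none => 0

-- ===== PORT A =====
def heatmap_start_column (strip_configs : List (List (String × String))) (heatmap_configs : List (List (String × String))) (text_configs : List (List (String × String))) (spacing_config : List (String × String)) : Int :=
  let ci : Int := 0
  let ci := if spInt spacing_config "before_strips" > 0 then ci + 1 else ci
  let ci := strip_configs.foldl
    (fun ci _ =>
      let ci := ci + 1
      if spInt spacing_config "between_strips" > 0 then ci + 1 else ci) ci
  if strip_configs ≠ [] ∧ (text_configs ≠ [] ∨ heatmap_configs ≠ []) ∧ spInt spacing_config "between_strips_and_text" > 0 then ci + 1 else ci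

-- ===== PORT B =====
def heatmap_start_column_alt (strip_configs : List (List (String × String))) (heatmap_configs : List (List (String × String))) (text_configs : List (List (String × String))) (spacing_config : List (String × String)) : Int :=
  let total : Int := if 0 < spInt spacing_config "before_strips" then 1 else 0
  if strip_configs ≠ [] then
    let step : Int := if 0 < spInt spacing_config "between_strips" then 2 else 1
    let total := total + step * (strip_configs.length : Int)
    if (text_configs ≠ [] ∨ heatmap_configs ≠ []) ∧ 0 < spInt spacing_config "between_strips_and_text" then
      total + 1
    else total
  else total

-- ===== PRECONDITION & SPEC =====
-- True iff int() would succeed on the value stored under k (vacuously true if k is absent).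
def spOk (spacing_config : List (String × String)) (k : String) : Bool :=
  match spacing_config.find? (fun p => p.1 == k) with
  | some p => (PySem.Int.ofStr? p.2).isSome
  | none => true

-- Pre_ excludes exactly the inputs on which Python A raises ValueError: a spacing value that
-- int() cannot parse, under a key the control flow actually reads.
def Pre_heatmap_start_column (strip_configs : List (List (String × String))) (heatmap_configs : List (List (String × String))) (text_configs : List (List (String × String))) (spacing_config : List (String × String)) : Prop :=
  spOk spacing_config "before_strips" = true ∧
  (strip_configs ≠ [] → spOk spacing_config "between_strips" = true) ∧
  (strip_configs ≠ [] ∧ (text_configs ≠ [] ∨ heatmap_configs ≠ []) → spOk spacing_config "between_strips_and_text" = true)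
instance (strip_configs : List (List (String × String))) (heatmap_configs : List (List (String × String))) (text_configs : List (List (String × String))) (spacing_config : List (String × String)) : Decidable (Pre_heatmap_start_column strip_configs heatmap_configs text_configs spacing_config) := by unfold Pre_heatmap_start_column; infer_instance

def pvWitness_heatmap_start_column : (List (List (String × String))) × (List (List (String × String))) × (List (List (String × String))) × (List (String × String)) :=
  ([[("name", "s1")]], [], [[("t", "x")]], [("before_strips", "1"), ("between_strips", "0"), ("between_strips_and_text", " 2 ")])

def Spec_heatmap_start_column (strip_configs : List (List (String × String))) (heatmap_configs : List (List (String × String))) (text_configs : List (List (String × String))) (spacing_config : List (String × String)) (out : Int) : Prop := out = heatmap_start_column_alt strip_configs heatmap_configs text_configs spacing_config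
instance (strip_configs : List (List (String × String))) (heatmap_configs : List (List (String × String))) (text_configs : List (List (String × String))) (spacing_config : List (String × String)) (out : Int) : Decidable (Spec_heatmap_start_column strip_configs heatmap_configs text_configs spacing_config out) := by unfold Spec_heatmap_start_column; infer_instance

-- ===== CLAIM =====
def Claim_equal_heatmap_start_column : Prop := ∀ (strip_configs : List (List (String × String))) (heatmap_configs : List (List (String × String))) (text_configs : List (List (String × String))) (spacing_config : List (String × String)), Dom_heatmap_start_column strip_configs heatmap_configs text_configs spacing_config → Pre_heatmap_start_column strip_configs heatmap_configs text_configs spacing_config → Spec_heatmap_start_column strip_configs heatmap_configs text_configs spacing_config (heatmap_start_column strip_configs heatmap_configs text_configs spacing_config)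

-- ===== LEMMAS AND PROOFS =====

-- A's loop adds 1 (or 2, when between_strips > 0) per strip: closed form.
theorem foldl_strip_count (P : Prop) [Decidable P] (l : List (List (String × String))) (init : Int) :
    l.foldl (fun ci _ => let ci := ci + 1; if P then ci + 1 else ci) init
      = init + (if P then 2 else 1) * l.length := by
  induction l generalizing init with
  | nil => simp
  | cons h t ih =>
    simp only [List.foldl_cons, ih, List.length_cons]
    split_ifs <;> omega

theorem heatmap_start_column_eq_alt (strip_configs : List (List (String × String))) (heatmap_configs : List (List (String × String))) (text_configs : List (List (String × String))) (spacing_config : List (String × String)) :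
    heatmap_start_column strip_configs heatmap_configs text_configs spacing_config
      = heatmap_start_column_alt strip_configs heatmap_configs text_configs spacing_config := by
  unfold heatmap_start_column heatmap_start_column_alt
  simp only [foldl_strip_count]
  rcases strip_configs with _ | ⟨s, ss⟩ <;> split_ifs <;> simp_all

-- ===== VERDICT =====
theorem heatmap_start_column_spec : Claim_equal_heatmap_start_column := by
  intro sc hc tc sp _ _
  exact heatmap_start_column_eq_alt sc hc tc sp
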